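-- pv_equiv track=rewrite | github.com/KKWaxy/Simplexe | algorithme.py | nouvelles_contraintes
-- ===== SOURCE A (Python) =====
-- def nouvelles_contraintes(contraintes,base):
--         """Cette fonction insere les  possibles variales artificielle cree lors de la determination de la base realisable"""
--         nb_var = len(contraintes[0]) - 1
--         ###nb_var represente le nombre de variable presente dans le probleme avant l'ajout des variables artificielles
--         for k in range(len(base)):#pour chaque element de la base....
--                 if int(base[k][1]) > nb_var:# si xi est superieur a nb_var...
--                         for i in range(len(contraintes)):
--                                 if i == k:                                      ### on insere la variable artifielle a chaque colonne des contraintes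
--                                         contraintes[i].insert(-1,1)     ## avec le coefficient 1 lorsqu'il a ete ajouter a cette contrainte
--                                 else:
--                                         contraintes[i].insert(-1,0)     ## et avec le coefficient 0 ailleurs
--         return contraintes
-- ===== SOURCE B (Python) =====
-- def nouvelles_contraintes(contraintes, base):
--     """Build once a dictionary mapping each qualifying base index to its column
--     position; then each row receives a zero block with (at most) a single 1
--     placed by O(1) dictionary lookup, spliced in place before the last element
--     (same row objects mutated, same outer list returned, as in the original)."""
--     nb_var = len(contraintes[0]) - 1
--     pos = {}
--     for k, name in enumerate(base):
--         if int(name[1]) > nb_var: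
--             pos[k] = len(pos)
--     width = len(pos)
--     for i, row in enumerate(contraintes):
--         block = [0] * width
--         j = pos.get(i)
--         if j is not None:
--             block[j] = 1
--         row[-1:-1] = block
--     return contraintes
-- ===== Notes on version B (the rewrite author's own statement) =====
-- stated objective: alternative
-- what changed: B replaces A's per-qualifying-index single inserts into every row by a position dictionary built in one scan of base (index -> column position); each row then gets a pre-sized zero block whose single 1 is placed by an O(1) dictionary lookup and spliced in with one bulk slice assignment, so the inner per-coefficient comparison/insert pass disappears.
-- intended difference: On matrices containing an empty constraint row whose index qualifies while at least one other base index also qualifies, A returns that row with the first inserted coefficient rotated to the end (an artefact of list.insert(-1,.) appending to an empty list), while B returns the coefficients in base order, the intended column order. — e.g. on nouvelles_contraintes([[], [1]], ["x9", "x8"]): A returns [[0, 1], [0, 1, 1]], B returns [[1, 0], [0, 1, 1]]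
import Mathlib
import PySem

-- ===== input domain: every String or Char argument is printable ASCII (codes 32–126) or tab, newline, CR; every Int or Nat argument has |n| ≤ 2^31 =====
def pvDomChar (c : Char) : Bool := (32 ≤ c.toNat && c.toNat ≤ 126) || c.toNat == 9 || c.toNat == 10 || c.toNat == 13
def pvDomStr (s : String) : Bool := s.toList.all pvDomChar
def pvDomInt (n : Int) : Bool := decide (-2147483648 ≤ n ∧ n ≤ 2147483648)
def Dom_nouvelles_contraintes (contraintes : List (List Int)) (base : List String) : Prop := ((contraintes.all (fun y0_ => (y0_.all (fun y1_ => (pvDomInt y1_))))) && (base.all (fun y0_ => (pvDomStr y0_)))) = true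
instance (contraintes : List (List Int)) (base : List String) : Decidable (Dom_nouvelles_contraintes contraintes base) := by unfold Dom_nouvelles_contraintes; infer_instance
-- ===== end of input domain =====

-- ===== PORT A =====
-- B builds a position dictionary (qualifying base index -> column position) once and splices
-- into each row a zero block with one dictionary-looked-up 1, instead of A's per-index single
-- inserts; both Pythons mutate `contraintes` in place the same way (the equivalence proved here
-- is about the returned value). On empty rows A's insert(-1,.) order is accidental: see D_ below.

-- int(c) for a single decimal-digit character (exact on '0'..'9'; Pre_ guarantees that is all we meet)
def pyDigitInt (c : Char) : Int := (c.toNat : Int) - 48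

-- int(base[k][1]) (exact under Pre_: base[k] has length >= 2 and base[k][1] is a digit)
def baseVal (base : List String) (k : Nat) : Int := pyDigitInt ((base.getD k "").toList.getD 1 ' ')

def nouvelles_contraintes (contraintes : List (List Int)) (base : List String) : List (List Int) :=
  let nb_var : Int := ((contraintes.headD []).length : Int) - 1
  (List.range base.length).foldl
    (fun cs k =>
      if baseVal base k > nb_var then
        cs.mapIdx (fun i row => PySem.List.insert row (-1) (if i = k then (1 : Int) else 0))
      else cs)
    contraintes

-- ===== PORT B =====
def nouvelles_contraintes_alt (contraintes : List (List Int)) (base : List String) : List (List Int) :=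
  let nb_var : Int := ((contraintes.headD []).length : Int) - 1
  let pos : PySem.Dict Nat Nat :=
    (List.range base.length).foldl
      (fun d k => if baseVal base k > nb_var then d.insert k d.size else d)
      PySem.Dict.empty
  let width := pos.size
  contraintes.mapIdx (fun i row =>
    let block : List Int :=
      match pos.get? i with
      | some j => (List.replicate width (0 : Int)).set j 1
      | none => List.replicate width (0 : Int)
    row.take (row.length - 1) ++ block ++ row.drop (row.length - 1))

-- ===== PRECONDITION & SPEC =====
-- Pre_ excludes exactly the inputs where the Python A raises: an empty `contraintes`
-- (IndexError on contraintes[0]) and base strings with fewer than 2 characters (IndexError)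
-- or a non-digit second character (ValueError in int()).
def Pre_nouvelles_contraintes (contraintes : List (List Int)) (base : List String) : Prop :=
  contraintes ≠ [] ∧ ∀ s ∈ base, 2 ≤ s.toList.length ∧ (s.toList.getD 1 ' ').isDigit = true
instance (contraintes : List (List Int)) (base : List String) : Decidable (Pre_nouvelles_contraintes contraintes base) := by unfold Pre_nouvelles_contraintes; infer_instance

def pvWitness_nouvelles_contraintes : List (List Int) × List String := ([[1, 2], [3, 4]], ["x3"])

-- base entry s names an added (artificial) variable: its digit char code exceeds nb_var + 48
def artifVar (contraintes : List (List Int)) (s : String) : Bool :=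
  (contraintes.headD []).length + 48 ≤ (s.toList.getD 1 ' ').toNat

-- On matrices containing an empty constraint row whose base entry qualifies while at least one
-- other base entry also qualifies, A returns that row with the first inserted coefficient rotated
-- to the end (an artefact of list.insert(-1,.) appending to an empty list), while B returns the
-- coefficients in base order, the intended column order.
def D_nouvelles_contraintes (contraintes : List (List Int)) (base : List String) : Prop :=
  ∃ i < contraintes.length, contraintes.getD i [] = [] ∧ i < base.length ∧
    artifVar contraintes (base.getD i "") = true ∧ 1 < base.countP (artifVar contraintes)
instance (contraintes : List (List Int)) (base : List String) : Decidable (D_nouvelles_contraintes contraintes base) := by unfold D_nouvelles_contraintes; infer_instance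

def Spec_nouvelles_contraintes (contraintes : List (List Int)) (base : List String) (out : List (List Int)) : Prop := ¬ D_nouvelles_contraintes contraintes base → out = nouvelles_contraintes_alt contraintes base
instance (contraintes : List (List Int)) (base : List String) (out : List (List Int)) : Decidable (Spec_nouvelles_contraintes contraintes base out) := by unfold Spec_nouvelles_contraintes; infer_instance

def pvDiffWitness_nouvelles_contraintes : List (List Int) × List String := ([[], [1]], ["x9", "x8"])
def pvDiffWitnessOut_nouvelles_contraintes : (List (List Int)) × (List (List Int)) :=
  ([[0, 1], [0, 1, 1]], [[1, 0], [0, 1, 1]])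

-- ===== CLAIM (what is proved, stated in full; the proofs are below) =====
def Claim_unchanged_nouvelles_contraintes : Prop := ∀ (contraintes : List (List Int)) (base : List String), Dom_nouvelles_contraintes contraintes base → Pre_nouvelles_contraintes contraintes base → Spec_nouvelles_contraintes contraintes base (nouvelles_contraintes contraintes base)
def Claim_changed_nouvelles_contraintes : Prop := Dom_nouvelles_contraintes (pvDiffWitness_nouvelles_contraintes.1) (pvDiffWitness_nouvelles_contraintes.2) ∧ Pre_nouvelles_contraintes (pvDiffWitness_nouvelles_contraintes.1) (pvDiffWitness_nouvelles_contraintes.2) ∧ D_nouvelles_contraintes (pvDiffWitness_nouvelles_contraintes.1) (pvDiffWitness_nouvelles_contraintes.2) ∧ nouvelles_contraintes (pvDiffWitness_nouvelles_contraintes.1) (pvDiffWitness_nouvelles_contraintes.2) = pvDiffWitnessOut_nouvelles_contraintes.1 ∧ nouvelles_contraintes_alt (pvDiffWitness_nouvelles_contraintes.1) (pvDiffWitness_nouvelles_contraintes.2) = pvDiffWitnessOut_nouvelles_contraintes.2 ∧ pvDiffWitnessOut_nouvelles_contraintes.1 ≠ pvDiffWitnessOut_nouvelles_contraintes.2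
def Claim_exact_nouvelles_contraintes : Prop := ∀ (contraintes : List (List Int)) (base : List String), Dom_nouvelles_contraintes contraintes base → Pre_nouvelles_contraintes contraintes base → D_nouvelles_contraintes contraintes base → nouvelles_contraintes contraintes base ≠ nouvelles_contraintes_alt contraintes base

-- ===== LEMMAS AND PROOFS =====

-- the ordered list of qualifying indices, as a proof-side abbreviation
def qList (contraintes : List (List Int)) (base : List String) : List Nat :=
  (List.range base.length).filter
    (fun k => baseVal base k > ((contraintes.headD []).length : Int) - 1)

theorem mem_qList {contraintes : List (List Int)} {base : List String} {k : Nat} :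
    k ∈ qList contraintes base
      ↔ k < base.length ∧ artifVar contraintes (base.getD k "") = true := by
  simp only [qList, List.mem_filter, List.mem_range, decide_eq_true_eq,
    baseVal, pyDigitInt, artifVar]
  constructor <;> rintro ⟨h1, h2⟩ <;> exact ⟨h1, by omega⟩

theorem nodup_qList (contraintes : List (List Int)) (base : List String) :
    (qList contraintes base).Nodup :=
  (List.nodup_range).filter _

theorem length_qList (contraintes : List (List Int)) (base : List String) :
    (qList contraintes base).length = base.countP (artifVar contraintes) := by
  have hb : (List.range base.length).map (fun k => base.getD k "") = base := by
    apply List.ext_getElem (by simp)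
    intro i h1 h2
    have hib : i < base.length := h2
    simp [List.getD_eq_getElem?_getD, List.getElem?_eq_getElem hib]
  conv_rhs => rw [← hb]
  rw [List.countP_map, qList, ← List.countP_eq_length_filter]
  apply List.countP_congr
  intro k _
  simp only [baseVal, pyDigitInt, artifVar, Function.comp, decide_eq_true_eq]
  omega

-- B's position-dictionary loop over fresh increasing keys builds exactly the
-- (qualifying index, column position) pairs, in order
theorem posDict_items (p : Nat → Prop) [DecidablePred p] : ∀ (n : Nat),
    ((List.range n).foldl (fun d k => if p k then d.insert k d.size else d)
        (PySem.Dict.empty : PySem.Dict Nat Nat)).items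
      = ((List.range n).filter (fun k => decide (p k))).zipIdx := by
  intro n
  induction n with
  | zero => rfl
  | succ n ih =>
      rw [List.range_succ]
      simp only [List.foldl_append, List.foldl_cons, List.foldl_nil, List.filter_append,
        List.filter_cons, List.filter_nil]
      by_cases hp : p n
      · have hkeys : ((List.range n).foldl
            (fun d k => if p k then d.insert k d.size else d)
            (PySem.Dict.empty : PySem.Dict Nat Nat)).keys
              = (List.range n).filter (fun k => decide (p k)) := by
          show (_ : PySem.Dict Nat Nat).items.map Prod.fst = _
          rw [ih, List.zipIdx_map_fst]
        have hnc : ((List.range n).foldl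
            (fun d k => if p k then d.insert k d.size else d)
            (PySem.Dict.empty : PySem.Dict Nat Nat)).contains n = false := by
          rw [PySem.Dict.contains_eq_decide_mem_keys, hkeys, decide_eq_false_iff_not]
          intro hmem
          exact absurd (List.mem_range.mp (List.mem_of_mem_filter hmem)) (lt_irrefl n)
        have hsz : ((List.range n).foldl
            (fun d k => if p k then d.insert k d.size else d)
            (PySem.Dict.empty : PySem.Dict Nat Nat)).size
              = ((List.range n).filter (fun k => decide (p k))).length := by
          show (_ : PySem.Dict Nat Nat).items.length = _
          rw [ih, List.length_zipIdx]
        rw [if_pos hp, if_pos (decide_eq_true hp),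
          PySem.Dict.items_insert_of_not_contains _ _ hnc, ih, hsz, List.zipIdx_append]
        simp
      · rw [if_neg hp, if_neg (by simpa using hp), ih]
        simp

-- the block B builds for row i is exactly the indicator column over qList
theorem block_eq_indicator (contraintes : List (List Int)) (base : List String) (i : Nat) :
    (match (((List.range base.length).foldl
        (fun d k => if baseVal base k > ((contraintes.headD []).length : Int) - 1
                    then d.insert k d.size else d)
        (PySem.Dict.empty : PySem.Dict Nat Nat))).get? i with
      | some j => (List.replicate (qList contraintes base).length (0 : Int)).set j 1
      | none => List.replicate (qList contraintes base).length (0 : Int))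
      = (qList contraintes base).map (fun k => if i = k then (1 : Int) else 0) := by
  set q := qList contraintes base with hq
  set d := ((List.range base.length).foldl
      (fun d k => if baseVal base k > ((contraintes.headD []).length : Int) - 1
                  then d.insert k d.size else d)
      (PySem.Dict.empty : PySem.Dict Nat Nat)) with hd
  have hitems : d.items = q.zipIdx := by
    rw [hd, posDict_items (fun k => baseVal base k > ((contraintes.headD []).length : Int) - 1)
      base.length]
    rfl
  have hkeys : d.keys = q := by
    show d.items.map Prod.fst = q
    rw [hitems, List.zipIdx_map_fst]
  have hnd : d.keys.Nodup := by rw [hkeys]; exact nodup_qList _ _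
  cases hget : d.get? i with
  | some j =>
      have hmem : (i, j) ∈ q.zipIdx := by
        rw [← hitems]; exact PySem.Dict.mem_items_of_get?_eq_some _ hget
      have hm := List.mem_zipIdx hmem
      have hjl : j < q.length := by simpa using hm.2.1
      have hqj : q[j] = i := by
        have := hm.2.2
        simp only [Nat.sub_zero] at this
        exact this.symm
      apply List.ext_getElem (by simp)
      intro m h1 h2
      have hml : m < q.length := by simpa using h2
      rw [List.getElem_set, List.getElem_map]
      have hiff : j = m ↔ i = q[m] := by
        constructor
        · rintro rfl; exact hqj.symm
        · intro h
          have : q[j] = q[m] := hqj.trans h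
          exact (List.Nodup.getElem_inj_iff (nodup_qList contraintes base)).mp this
      by_cases hjm : j = m
      · rw [if_pos hjm, if_pos (hiff.mp hjm)]
      · rw [if_neg hjm, if_neg (fun h => hjm (hiff.mpr h)), List.getElem_replicate]
  | none =>
      have hni : i ∉ q := by
        rw [← hkeys]
        exact (PySem.Dict.get?_eq_none_iff_not_mem_keys _ _).mp hget
      apply List.ext_getElem (by simp)
      intro m h1 h2
      have hml : m < q.length := by simpa using h2
      rw [List.getElem_replicate, List.getElem_map,
        if_neg (fun h => hni (by rw [h]; exact List.getElem_mem hml))]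

-- python list.insert(row, -1, v) appends to an empty row
theorem insert_neg_one_nil (v : Int) : PySem.List.insert ([] : List Int) (-1) v = [v] := by
  simp [PySem.List.insert, PySem.List.sliceIndices]

-- python list.insert(row, -1, v) on a nonempty row puts v just before the last element
theorem insert_neg_one_concat (ys : List Int) (z v : Int) :
    PySem.List.insert (ys ++ [z]) (-1) v = ys ++ [v, z] := by
  have h : (PySem.List.sliceIndices (ys.length + 1) (some (-1)) none 1).1.toNat = ys.length := by
    simp [PySem.List.sliceIndices]
  simp [PySem.List.insert, h]

theorem foldl_insert_concat (vs : List Int) : ∀ (ys : List Int) (z : Int),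
    vs.foldl (fun r v => PySem.List.insert r (-1) v) (ys ++ [z]) = ys ++ vs ++ [z] := by
  induction vs with
  | nil => intro ys z; simp
  | cons v vs ih =>
      intro ys z
      simp only [List.foldl_cons, insert_neg_one_concat]
      have h : (ys ++ [v, z] : List Int) = (ys ++ [v]) ++ [z] := by simp
      rw [h, ih]
      simp

theorem foldl_insert_nil (v : Int) (vs : List Int) :
    (v :: vs).foldl (fun r v => PySem.List.insert r (-1) v) [] = vs ++ [v] := by
  simpa [insert_neg_one_nil] using foldl_insert_concat vs [] v

-- exchanging A's outer fold with its inner per-row map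
theorem foldl_mapIdx_comm (step : Nat → Nat → List Int → List Int) (q : List Nat) :
    ∀ (cs : List (List Int)),
      q.foldl (fun cs k => cs.mapIdx (fun i row => step k i row)) cs
        = cs.mapIdx (fun i row => q.foldl (fun r k => step k i r) row) := by
  induction q with
  | nil =>
      intro cs
      simp only [List.foldl_nil]
      induction cs with
      | nil => rfl
      | cons a t iht => rw [List.mapIdx_cons, ← iht]
  | cons k q ih =>
      intro cs
      simp only [List.foldl_cons]
      rw [ih, List.mapIdx_mapIdx]
      rfl

-- A, reshaped: a per-row left fold of single inserts of that row's column entries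
theorem A_eq_mapIdx (contraintes : List (List Int)) (base : List String) :
    nouvelles_contraintes contraintes base
      = contraintes.mapIdx (fun i row =>
          ((qList contraintes base).map (fun k => if i = k then (1 : Int) else 0)).foldl
            (fun r v => PySem.List.insert r (-1) v) row) := by
  have h1 : nouvelles_contraintes contraintes base
      = (qList contraintes base).foldl
          (fun cs k => cs.mapIdx
            (fun i row => PySem.List.insert row (-1) (if i = k then (1 : Int) else 0)))
          contraintes := by
    simp only [nouvelles_contraintes, qList, List.foldl_filter, decide_eq_true_eq]
  rw [h1,
    foldl_mapIdx_comm (fun k i row => PySem.List.insert row (-1) (if i = k then (1 : Int) else 0))]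
  simp only [List.foldl_map]

-- B, reshaped to the same indicator column list
theorem B_eq_mapIdx (contraintes : List (List Int)) (base : List String) :
    nouvelles_contraintes_alt contraintes base
      = contraintes.mapIdx (fun i row =>
          row.take (row.length - 1)
            ++ ((qList contraintes base).map (fun k => if i = k then (1 : Int) else 0))
            ++ row.drop (row.length - 1)) := by
  have hsz : (((List.range base.length).foldl
      (fun d k => if baseVal base k > ((contraintes.headD []).length : Int) - 1
                  then d.insert k d.size else d)
      (PySem.Dict.empty : PySem.Dict Nat Nat))).size
        = (qList contraintes base).length := by
    show (_ : PySem.Dict Nat Nat).items.length = _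
    rw [posDict_items (fun k => baseVal base k > ((contraintes.headD []).length : Int) - 1)
      base.length]
    rw [List.length_zipIdx]
    rfl
  simp only [nouvelles_contraintes_alt]
  congr 1
  funext i row
  rw [hsz]
  rw [block_eq_indicator contraintes base i]

-- a nodup list containing x whose members all equal x is [x]
theorem nodup_all_eq (l : List Nat) (x : Nat) (hnd : l.Nodup) (hx : x ∈ l)
    (hall : ∀ y ∈ l, y = x) : l = [x] := by
  cases l with
  | nil => cases hx
  | cons a t =>
      have ha : a = x := hall a (by simp)
      cases t with
      | nil => simp [ha]
      | cons b t =>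
          exfalso
          have hb : b = x := hall b (by simp)
          have : a ∉ b :: t := (List.nodup_cons.mp hnd).1
          exact this (by simp [ha, hb])

theorem one_lt_length_of_two_mem {l : List Nat} {x y : Nat} (hx : x ∈ l) (hy : y ∈ l)
    (hne : x ≠ y) : 1 < l.length := by
  cases l with
  | nil => cases hx
  | cons a t =>
      cases t with
      | nil =>
          simp at hx hy
          exact absurd (hx.trans hy.symm) hne
      | cons b t => simp only [List.length_cons]; omega

theorem exists_other {l : List Nat} {x : Nat} (hnd : l.Nodup) (hx : x ∈ l)
    (hlen : 1 < l.length) : ∃ y ∈ l, y ≠ x := by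
  by_contra hno
  push Not at hno
  have h1 : l = [x] := nodup_all_eq l x hnd hx hno
  rw [h1] at hlen
  simp at hlen

-- if rotating a nonempty list one step leaves it unchanged, all its elements are equal
theorem rot_fix : ∀ (vs : List Int) (v : Int), vs ++ [v] = v :: vs → ∀ x ∈ v :: vs, x = v := by
  intro vs
  induction vs with
  | nil => intro v _ x hx; simpa using hx
  | cons w t ih =>
      intro v h x hx
      rw [List.cons_append] at h
      obtain ⟨hv, ht⟩ := List.cons.inj h
      subst hv
      rcases List.mem_cons.mp hx with rfl | hx'
      · rfl
      · exact ih w ht x hx'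

theorem unchanged_core (contraintes : List (List Int)) (base : List String)
    (hnd : ¬ D_nouvelles_contraintes contraintes base) :
    nouvelles_contraintes contraintes base = nouvelles_contraintes_alt contraintes base := by
  rw [A_eq_mapIdx, B_eq_mapIdx]
  apply List.ext_getElem (by simp)
  intro i h1 h2
  simp only [List.getElem_mapIdx]
  have hi : i < contraintes.length := by simpa using h1
  rcases List.eq_nil_or_concat contraintes[i] with hrow | ⟨ys, z, hrow⟩
  · -- empty row: B splices the column whole; A's fold agrees with it outside D_
    rw [hrow]
    simp only [List.length_nil, Nat.zero_sub, List.take_nil, List.drop_nil,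
      List.nil_append, List.append_nil]
    by_cases hq : i ∈ qList contraintes base
    · -- i qualifies, so (by ¬ D_) no other index does: the column is [1]
      have honly : ∀ y ∈ qList contraintes base, y = i := by
        intro y hy
        by_contra hne
        have hmi := mem_qList.mp hq
        exact hnd ⟨i, hi, by simp [List.getElem?_eq_getElem hi, hrow], hmi.1, hmi.2,
          by rw [← length_qList]; exact one_lt_length_of_two_mem hy hq hne⟩
      have hq1 : qList contraintes base = [i] :=
        nodup_all_eq _ _ (nodup_qList _ _) hq honly
      simp [hq1, insert_neg_one_nil]
    · -- i does not qualify: the column is all zeros, for which A's rotation is invisible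
      have hzero : (qList contraintes base).map (fun k => if i = k then (1 : Int) else 0)
          = List.replicate (qList contraintes base).length 0 := by
        rw [List.eq_replicate_iff]
        refine ⟨by simp, ?_⟩
        intro x hx
        rcases List.mem_map.mp hx with ⟨k, hk, hkx⟩
        have : ¬ i = k := fun h => hq (h ▸ hk)
        simpa [this] using hkx.symm
      rw [hzero]
      cases hm : (qList contraintes base).length with
      | zero => simp
      | succ m =>
          rw [List.replicate_succ, foldl_insert_nil, ← List.replicate_succ']
          rw [List.replicate_succ]
  · -- nonempty row: A's successive inserts before the last element build exactly B's splice
    rw [List.concat_eq_append] at hrow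
    rw [hrow, foldl_insert_concat]
    have hl : (ys ++ [z]).length - 1 = ys.length := by simp
    rw [hl]
    simp

-- ===== VERDICT (by name: the statement is the Claim_ definition above) =====
theorem nouvelles_contraintes_spec : Claim_unchanged_nouvelles_contraintes := by
  intro contraintes base _ _ hnd
  exact unchanged_core contraintes base hnd

theorem nouvelles_contraintes_changed : Claim_changed_nouvelles_contraintes := by
  unfold Claim_changed_nouvelles_contraintes; decide

theorem nouvelles_contraintes_tight : Claim_exact_nouvelles_contraintes := by
  intro contraintes base _ _ hd heq
  obtain ⟨i, hi, hrow, hib, hart, hcnt⟩ := hd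
  have hrow' : contraintes[i] = [] := by
    rwa [List.getD_eq_getElem?_getD, List.getElem?_eq_getElem hi, Option.getD_some] at hrow
  have hqi : i ∈ qList contraintes base := mem_qList.mpr ⟨hib, hart⟩
  obtain ⟨j, hj, hji⟩ : ∃ y ∈ qList contraintes base, y ≠ i :=
    exists_other (nodup_qList _ _) hqi (by rw [length_qList]; exact hcnt)
  have h : (nouvelles_contraintes contraintes base).getD i []
      = (nouvelles_contraintes_alt contraintes base).getD i [] := by rw [heq]
  rw [A_eq_mapIdx, B_eq_mapIdx] at h
  have hiA : i < (contraintes.mapIdx (fun i row =>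
      ((qList contraintes base).map (fun k => if i = k then (1 : Int) else 0)).foldl
        (fun r v => PySem.List.insert r (-1) v) row)).length := by simpa using hi
  have hiB : i < (contraintes.mapIdx (fun i row =>
      row.take (row.length - 1)
        ++ ((qList contraintes base).map (fun k => if i = k then (1 : Int) else 0))
        ++ row.drop (row.length - 1))).length := by simpa using hi
  rw [List.getD_eq_getElem?_getD, List.getElem?_eq_getElem hiA, Option.getD_some,
    List.getD_eq_getElem?_getD, List.getElem?_eq_getElem hiB, Option.getD_some,
    List.getElem_mapIdx, List.getElem_mapIdx, hrow'] at h
  simp only [List.length_nil, Nat.zero_sub, List.take_nil, List.drop_nil,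
    List.nil_append, List.append_nil] at h
  -- the column contains the 1 for row i and a 0 for the other qualifying index j
  have h1mem : (1 : Int) ∈ (qList contraintes base).map (fun k => if i = k then (1 : Int) else 0) :=
    List.mem_map.mpr ⟨i, hqi, by simp⟩
  have h0mem : (0 : Int) ∈ (qList contraintes base).map (fun k => if i = k then (1 : Int) else 0) :=
    List.mem_map.mpr ⟨j, hj, by simp [Ne.symm hji]⟩
  cases hc : (qList contraintes base).map (fun k => if i = k then (1 : Int) else 0) with
  | nil => rw [hc] at h1mem; cases h1mem
  | cons v vs =>
      rw [hc, foldl_insert_nil] at h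
      have hall := rot_fix vs v h
      rw [hc] at h1mem h0mem
      have e1 : (1 : Int) = v := hall 1 h1mem
      have e0 : (0 : Int) = v := hall 0 h0mem
      exact absurd (e1.trans e0.symm) (by norm_num)
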